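-- pv_equiv track=rewrite | github.com/Pb-22/pcap_triage | pcap_triage.py | domain_is_ignored
-- ===== SOURCE A (Python) =====
-- def normalize_domain(name):
--     if not name:
--         return ""
--     s = str(name).strip().lower()
--     # remove :port if present
--     if ":" in s:
--         s = s.split(":", 1)[0]
--     return s.rstrip(".")
--
-- def domain_is_ignored(domain, ignore_patterns):
--     d = normalize_domain(domain)
--     if not d:
--         return False
--     for raw in ignore_patterns:
--         p = normalize_domain(raw)
--         if not p:
--             continue
--         # Support: example.com | .example.com | *.example.com | *example.com
--         if p.startswith("*."):
--             suf = p[2:]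
--         elif p.startswith("*"):
--             suf = p[1:].lstrip(".")
--         elif p.startswith("."):
--             suf = p[1:]
--         else:
--             suf = p
--         if d == suf or d.endswith("." + suf):
--             return True
--     return False
-- ===== SOURCE B (Python) =====
-- def normalize_domain(name):
--     if not name:
--         return ""
--     s = str(name).strip().lower()
--     # remove :port if present
--     if ":" in s:
--         s = s.split(":", 1)[0]
--     return s.rstrip(".")
--
-- def _pattern_suffix(p):
--     # Support: example.com | .example.com | *.example.com | *example.com
--     if p.startswith("*."):
--         return p[2:]
--     if p.startswith("*"):
--         return p[1:].lstrip(".")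
--     if p.startswith("."):
--         return p[1:]
--     return p
--
-- def domain_is_ignored(domain, ignore_patterns):
--     suffixes = set()
--     for raw in ignore_patterns:
--         suf = _pattern_suffix(normalize_domain(raw))
--         if suf:
--             suffixes.add(suf)
--     d = normalize_domain(domain)
--     if not d:
--         return False
--     if d in suffixes:
--         return True
--     for i, ch in enumerate(d):
--         if ch == "." and d[i + 1:] in suffixes:
--             return True
--     return False
-- ===== Notes on version B (the rewrite author's own statement) =====
-- stated objective: alternative
-- what changed: B builds a set of normalized ignore suffixes in one pass and then tests the domain itself plus each of its label-boundary tails for membership, instead of A's per-pattern equality/endswith scan.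
import Mathlib
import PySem

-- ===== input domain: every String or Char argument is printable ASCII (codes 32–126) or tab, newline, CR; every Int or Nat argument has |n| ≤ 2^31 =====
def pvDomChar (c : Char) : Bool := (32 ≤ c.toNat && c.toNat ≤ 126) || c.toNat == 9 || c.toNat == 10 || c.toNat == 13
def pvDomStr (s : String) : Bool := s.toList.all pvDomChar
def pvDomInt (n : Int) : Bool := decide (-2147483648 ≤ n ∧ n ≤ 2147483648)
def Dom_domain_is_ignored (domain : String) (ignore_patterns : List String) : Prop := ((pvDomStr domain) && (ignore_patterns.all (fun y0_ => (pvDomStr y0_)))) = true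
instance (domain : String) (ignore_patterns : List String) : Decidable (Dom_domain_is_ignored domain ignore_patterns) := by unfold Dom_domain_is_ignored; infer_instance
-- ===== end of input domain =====

-- B replaces A's per-pattern endswith scan by a set of normalized suffixes checked
-- against the domain's label-boundary tails (objective: alternative decomposition).

-- ===== PORT A =====
-- s.rstrip(".") / s.lstrip(".") — not in PySem; exact: drops exactly the maximal run of '.' at that end
def rstripDots (cs : List Char) : List Char := ((cs.reverse).dropWhile (· == '.')).reverse
def lstripDots (cs : List Char) : List Char := cs.dropWhile (· == '.')

-- normalize_domain, working on the code-point list (str(name) is the identity: name is a str)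
def normalizeDomain (name : String) : List Char :=
  if name.toList = [] then []
  else
    let s := PySem.Chars.lower (PySem.Chars.strip name.toList)
    let s := if PySem.Chars.isIn [':'] s then (PySem.Chars.splitOnMax s [':'] 1).headD [] else s
    rstripDots s

-- the 'for raw in ignore_patterns' loop with its early return / continue
def loopA (d : List Char) : List String → Bool
  | [] => false
  | raw :: rest =>
    let p := normalizeDomain raw
    if p = [] then loopA d rest
    else
      let suf :=
        if PySem.Chars.startswith p ['*', '.'] then p.drop 2
        else if PySem.Chars.startswith p ['*'] then lstripDots (p.drop 1)
        else if PySem.Chars.startswith p ['.'] then p.drop 1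
        else p
      if d = suf || PySem.Chars.endswith d ('.' :: suf) then true else loopA d rest

def domain_is_ignored (domain : String) (ignore_patterns : List String) : Bool :=
  let d := normalizeDomain domain
  if d = [] then false else loopA d ignore_patterns

-- ===== PORT B =====
-- _pattern_suffix
def patternSuffix (p : List Char) : List Char :=
  if PySem.Chars.startswith p ['*', '.'] then p.drop 2
  else if PySem.Chars.startswith p ['*'] then lstripDots (p.drop 1)
  else if PySem.Chars.startswith p ['.'] then p.drop 1
  else p

-- the 'suffixes = set(); for raw in …: … suffixes.add(suf)' loop
def collectSuffixes (ignore_patterns : List String) : PySem.Set (List Char) :=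
  ignore_patterns.foldl (fun acc raw =>
    let suf := patternSuffix (normalizeDomain raw)
    if suf = [] then acc else PySem.Set.add acc suf) []

-- the 'for i, ch in enumerate(d)' loop testing d[i+1:]; the recursion carries d[i+1:] as `rest`
def checkTails (suffixes : PySem.Set (List Char)) : List Char → Bool
  | [] => false
  | c :: rest => if c = '.' && suffixes.contains rest then true else checkTails suffixes rest

def domain_is_ignored_alt (domain : String) (ignore_patterns : List String) : Bool :=
  let suffixes := collectSuffixes ignore_patterns
  let d := normalizeDomain domain
  if d = [] then false
  else if suffixes.contains d then true
  else checkTails suffixes d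

-- ===== PRECONDITION & SPEC =====
def Spec_domain_is_ignored (domain : String) (ignore_patterns : List String) (out : Bool) : Prop := out = domain_is_ignored_alt domain ignore_patterns
instance (domain : String) (ignore_patterns : List String) (out : Bool) : Decidable (Spec_domain_is_ignored domain ignore_patterns out) := by unfold Spec_domain_is_ignored; infer_instance

-- ===== CLAIM (what is proved, stated in full; the proofs are below) =====
def Claim_equal_domain_is_ignored : Prop := ∀ (domain : String) (ignore_patterns : List String), Dom_domain_is_ignored domain ignore_patterns → Spec_domain_is_ignored domain ignore_patterns (domain_is_ignored domain ignore_patterns)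

-- ===== LEMMAS AND PROOFS =====

lemma patternSuffix_nil : patternSuffix [] = [] := by decide

lemma loopA_eq_any (d : List Char) (l : List String) :
    loopA d l = l.any (fun raw =>
      let p := normalizeDomain raw
      decide (p ≠ []) && (decide (d = patternSuffix p) || PySem.Chars.endswith d ('.' :: patternSuffix p))) := by
  induction l with
  | nil => rfl
  | cons raw rest ih =>
    by_cases hp : normalizeDomain raw = []
    · simp [loopA, hp, ih]
    · simp only [loopA, List.any_cons, if_neg hp, ih, patternSuffix]
      simp only [hp, ne_eq, not_false_eq_true, decide_true, Bool.true_and]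
      split_ifs <;> simp_all

lemma mem_collect (l : List String) (x : List Char) :
    x ∈ collectSuffixes l ↔ x ≠ [] ∧ ∃ raw ∈ l, x = patternSuffix (normalizeDomain raw) := by
  have key : ∀ (l : List String) (acc : PySem.Set (List Char)),
      x ∈ l.foldl (fun acc raw =>
        let suf := patternSuffix (normalizeDomain raw)
        if suf = [] then acc else PySem.Set.add acc suf) acc ↔
      x ∈ acc ∨ (x ≠ [] ∧ ∃ raw ∈ l, x = patternSuffix (normalizeDomain raw)) := by
    intro l
    induction l with
    | nil => simp
    | cons raw rest ih =>
      intro acc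
      simp only [List.foldl_cons, ih]
      by_cases hs : patternSuffix (normalizeDomain raw) = []
      · simp only [hs]
        constructor
        · rintro (h | h)
          · exact Or.inl h
          · exact Or.inr ⟨h.1, h.2.imp fun r ⟨hr, he⟩ => ⟨List.mem_cons_of_mem _ hr, he⟩⟩
        · rintro (h | ⟨hx, r, hr, he⟩)
          · exact Or.inl h
          · rcases List.mem_cons.mp hr with rfl | hr
            · exact absurd (he ▸ hs) hx
            · exact Or.inr ⟨hx, r, hr, he⟩
      · rw [if_neg hs, PySem.Set.mem_add]
        constructor
        · rintro ((h | rfl) | h)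
          · exact Or.inl h
          · exact Or.inr ⟨hs, _, List.mem_cons_self .., rfl⟩
          · exact Or.inr ⟨h.1, h.2.imp fun r ⟨hr, he⟩ => ⟨List.mem_cons_of_mem _ hr, he⟩⟩
        · rintro (h | ⟨hx, r, hr, he⟩)
          · exact Or.inl (Or.inl h)
          · rcases List.mem_cons.mp hr with rfl | hr
            · exact Or.inl (Or.inr he)
            · exact Or.inr ⟨hx, r, hr, he⟩
  simpa using key l []

lemma checkTails_iff (S : PySem.Set (List Char)) (d : List Char) :
    checkTails S d = true ↔ ∃ suf ∈ S, ('.' :: suf) <:+ d := by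
  induction d with
  | nil =>
    simp only [checkTails]
    constructor
    · intro h; cases h
    · rintro ⟨suf, _, h⟩; simpa using h.length_le
  | cons c rest ih =>
    simp only [checkTails]
    constructor
    · intro h
      split_ifs at h with hc
      · have hc' := hc
        simp only [Bool.and_eq_true, decide_eq_true_eq] at hc'
        exact ⟨rest, by simpa using hc'.2, by rw [hc'.1]⟩
      · rcases ih.mp h with ⟨suf, hs, ht⟩
        exact ⟨suf, hs, ht.trans (List.suffix_cons _ _)⟩
    · rintro ⟨suf, hs, ht⟩
      rcases List.suffix_cons_iff.mp ht with he | ht'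
      · obtain ⟨rfl, rfl⟩ : c = '.' ∧ suf = rest := by
          injection he with h1 h2; exact ⟨h1.symm, h2⟩
        simp [hs]
      · split_ifs with hc
        · rfl
        · exact ih.mpr ⟨suf, hs, ht'⟩

lemma no_trailing_dot (cs : List Char) : ¬ (['.'] <:+ rstripDots cs) := by
  rintro ⟨t, ht⟩
  have h2 : cs.reverse.dropWhile (· == '.') = '.' :: t.reverse := by
    have := congrArg List.reverse ht
    simpa [rstripDots] using this.symm
  have := List.head?_dropWhile_not (· == '.') cs.reverse
  rw [h2] at this
  simp at this

lemma normalize_no_trailing_dot (name : String) (h : normalizeDomain name ≠ []) :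
    ¬ (['.'] <:+ normalizeDomain name) := by
  unfold normalizeDomain at *
  split_ifs at * with h1
  · simp at h
  · exact no_trailing_dot _

lemma suffix_nonempty_of_ne_nil (p : List Char) (h : patternSuffix p ≠ []) : p ≠ [] := by
  intro hp; rw [hp, patternSuffix_nil] at h; exact h rfl

-- ===== VERDICT (by name: the statement is the Claim_ definition above) =====
theorem domain_is_ignored_spec : Claim_equal_domain_is_ignored := by
  intro domain l _
  unfold Spec_domain_is_ignored domain_is_ignored domain_is_ignored_alt
  set d := normalizeDomain domain with hd
  by_cases hde : d = []
  · simp [hde]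
  · rw [if_neg hde, if_neg hde, loopA_eq_any]
    have hnd : ¬ (['.'] <:+ d) := normalize_no_trailing_dot domain hde
    rw [Bool.eq_iff_iff]
    simp only [List.any_eq_true, Bool.and_eq_true, Bool.or_eq_true, decide_eq_true_eq,
      PySem.Chars.endswith_iff]
    constructor
    · rintro ⟨raw, hraw, hp, hmatch⟩
      set suf := patternSuffix (normalizeDomain raw) with hsuf
      by_cases hse : suf = []
      · exfalso
        rcases hmatch with heq | hend
        · exact hde (heq.trans hse)
        · rw [hse] at hend; exact hnd hend
      · rcases hmatch with heq | hend
        · rw [if_pos (by rw [PySem.Set.contains_iff, mem_collect]; exact ⟨hde, raw, hraw, heq⟩)]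
        · split_ifs with hc
          · rfl
          · rw [checkTails_iff]
            exact ⟨suf, (mem_collect l suf).mpr ⟨hse, raw, hraw, rfl⟩, hend⟩
    · intro h
      split_ifs at h with hc
      · rw [PySem.Set.contains_iff, mem_collect] at hc
        rcases hc with ⟨_, raw, hraw, heq⟩
        exact ⟨raw, hraw, suffix_nonempty_of_ne_nil _ (heq ▸ hde), Or.inl heq⟩
      · rcases (checkTails_iff _ _).mp h with ⟨suf, hs, hend⟩
        rw [mem_collect] at hs
        rcases hs with ⟨hse, raw, hraw, heq⟩
        exact ⟨raw, hraw, suffix_nonempty_of_ne_nil _ (heq ▸ hse), Or.inr (heq ▸ hend)⟩
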